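-- pv_equiv track=rewrite | github.com/FlashDemo8789/newapp | enhanced_ai_integration.py | _extract_company_details
-- ===== SOURCE A (Python) =====
-- from typing import Dict, List, Any, Optional, Union, Tuple
--
-- def _extract_company_details(prompt: str) -> Dict[str, Any]:
--     """
--     Extract company details from the prompt for better offline responses.
--
--     Args:
--         prompt: The prompt string
--
--     Returns:
--         Dictionary with extracted company details
--     """
--     details = {
--         "name": "the company",
--         "sector": "technology",
--         "stage": "early stage"
--     }
--
--     # Try to extract company name
--     name_matches = [
--         line for line in prompt.split('\n')
--         if any(term in line.lower() for term in ["company:", "startup:", "name:"])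
--     ]
--
--     if name_matches:
--         parts = name_matches[0].split(":")
--         if len(parts) > 1:
--             details["name"] = parts[1].strip()
--
--     # Try to extract sector
--     sector_matches = [
--         line for line in prompt.split('\n')
--         if any(term in line.lower() for term in ["sector:", "industry:"])
--     ]
--
--     if sector_matches:
--         parts = sector_matches[0].split(":")
--         if len(parts) > 1:
--             details["sector"] = parts[1].strip()
--
--     # Try to extract stage
--     stage_matches = [
--         line for line in prompt.split('\n')
--         if "stage:" in line.lower()
--     ]
--
--     if stage_matches:
--         parts = stage_matches[0].split(":")
--         if len(parts) > 1:
--             details["stage"] = parts[1].strip()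
--
--     return details
-- ===== SOURCE B (Python) =====
-- def _extract_company_details(prompt: str):
--     """Single pass over the lines, each field locked by its first matching line."""
--     name_found, name = False, "the company"
--     sector_found, sector = False, "technology"
--     stage_found, stage = False, "early stage"
--     for line in prompt.split('\n'):
--         low = line.lower()
--         if not name_found and any(t in low for t in ("company:", "startup:", "name:")):
--             name_found = True
--             parts = line.split(":")
--             if len(parts) > 1:
--                 name = parts[1].strip()
--         if not sector_found and any(t in low for t in ("sector:", "industry:")):
--             sector_found = True
--             parts = line.split(":")
--             if len(parts) > 1:
--                 sector = parts[1].strip()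
--         if not stage_found and "stage:" in low:
--             stage_found = True
--             parts = line.split(":")
--             if len(parts) > 1:
--                 stage = parts[1].strip()
--     return {"name": name, "sector": sector, "stage": stage}
-- ===== Notes on version B (the rewrite author's own statement) =====
-- stated objective: alternative
-- what changed: Replaces A's three separate list-comprehension scans over the prompt's lines (plus first-element extraction and dict mutation) with a single pass over the lines that maintains a found-flag and value for each of the three fields.
import Mathlib
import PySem

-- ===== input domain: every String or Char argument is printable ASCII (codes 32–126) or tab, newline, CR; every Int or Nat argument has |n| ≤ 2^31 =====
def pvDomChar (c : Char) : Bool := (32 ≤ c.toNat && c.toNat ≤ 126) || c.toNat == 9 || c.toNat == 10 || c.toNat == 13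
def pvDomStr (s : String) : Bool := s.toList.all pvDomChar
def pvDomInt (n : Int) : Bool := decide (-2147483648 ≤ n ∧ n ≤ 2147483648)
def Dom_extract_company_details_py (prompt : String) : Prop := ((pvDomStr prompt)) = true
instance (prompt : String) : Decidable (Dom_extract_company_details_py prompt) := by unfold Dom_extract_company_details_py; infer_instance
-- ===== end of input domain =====

-- B is a single pass over the lines instead of A's three filter scans; same return value.

-- shared data / small predicates (used by both ports, as in the Pythons)
def pvMatchName (line : String) : Bool :=
  ["company:", "startup:", "name:"].any (fun t => PySem.Str.isIn t (PySem.Str.lower line))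
def pvMatchSector (line : String) : Bool :=
  ["sector:", "industry:"].any (fun t => PySem.Str.isIn t (PySem.Str.lower line))
def pvMatchStage (line : String) : Bool :=
  PySem.Str.isIn "stage:" (PySem.Str.lower line)

-- ===== PORT A =====
def extract_company_details_py (prompt : String) : List (String × String) :=
  let details : PySem.Dict String String :=
    PySem.Dict.ofList [("name", "the company"), ("sector", "technology"), ("stage", "early stage")]
  let name_matches := ((PySem.Str.split? prompt "\n").getD []).filter pvMatchName
  let details :=
    match name_matches with
    | [] => details
    | m :: _ =>
      let parts := (PySem.Str.split? m ":").getD []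
      if parts.length > 1 then details.insert "name" (PySem.Str.strip (parts.getD 1 "")) else details
  let sector_matches := ((PySem.Str.split? prompt "\n").getD []).filter pvMatchSector
  let details :=
    match sector_matches with
    | [] => details
    | m :: _ =>
      let parts := (PySem.Str.split? m ":").getD []
      if parts.length > 1 then details.insert "sector" (PySem.Str.strip (parts.getD 1 "")) else details
  let stage_matches := ((PySem.Str.split? prompt "\n").getD []).filter pvMatchStage
  let details :=
    match stage_matches with
    | [] => details
    | m :: _ =>
      let parts := (PySem.Str.split? m ":").getD []
      if parts.length > 1 then details.insert "stage" (PySem.Str.strip (parts.getD 1 "")) else details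
  details.items

-- ===== PORT B =====
-- one field's update on one line: lock on first match, take parts[1].strip() when it exists
def pvStepField (st : Bool × String) (m : Bool) (line : String) : Bool × String :=
  if !st.1 && m then
    let parts := (PySem.Str.split? line ":").getD []
    (true, if parts.length > 1 then PySem.Str.strip (parts.getD 1 "") else st.2)
  else st

def extract_company_details_py_alt (prompt : String) : List (String × String) :=
  let fin := ((PySem.Str.split? prompt "\n").getD []).foldl
    (fun (st : (Bool × String) × (Bool × String) × (Bool × String)) line =>
      (pvStepField st.1 (pvMatchName line) line,
       pvStepField st.2.1 (pvMatchSector line) line,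
       pvStepField st.2.2 (pvMatchStage line) line))
    ((false, "the company"), (false, "technology"), (false, "early stage"))
  [("name", fin.1.2), ("sector", fin.2.1.2), ("stage", fin.2.2.2)]

-- ===== PRECONDITION & SPEC =====
def Spec_extract_company_details_py (prompt : String) (out : List (String × String)) : Prop := out = extract_company_details_py_alt prompt
instance (prompt : String) (out : List (String × String)) : Decidable (Spec_extract_company_details_py prompt out) := by unfold Spec_extract_company_details_py; infer_instance

-- ===== CLAIM (what is proved, stated in full; the proofs are below) =====
def Claim_equal_extract_company_details_py : Prop := ∀ (prompt : String), Dom_extract_company_details_py prompt → Spec_extract_company_details_py prompt (extract_company_details_py prompt)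

-- ===== LEMMAS AND PROOFS =====

-- the value a matching line contributes (parts[1].strip() if it exists, else the current value)
def pvExtract (line d : String) : String :=
  let parts := (PySem.Str.split? line ":").getD []
  if parts.length > 1 then PySem.Str.strip (parts.getD 1 "") else d

-- once a field is locked, the per-field fold never changes it
theorem pvFold_locked (p : String → Bool) (lines : List String) (v : String) :
    lines.foldl (fun st line => pvStepField st (p line) line) (true, v) = (true, v) := by
  induction lines with
  | nil => rfl
  | cons l ls ih => simpa [pvStepField] using ih

-- the per-field fold from an unlocked start computes exactly A's "first filter match" value
theorem pvFold_field (p : String → Bool) (lines : List String) (d : String) :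
    (lines.foldl (fun st line => pvStepField st (p line) line) (false, d)).2 =
      (match lines.filter p with
       | [] => d
       | m :: _ => pvExtract m d) := by
  induction lines with
  | nil => rfl
  | cons l ls ih =>
    rw [List.foldl_cons]
    by_cases h : p l = true
    · have hstep : pvStepField (false, d) (p l) l = (true, pvExtract l d) := by
        simp [pvStepField, pvExtract, h]
      rw [hstep, pvFold_locked]
      simp [h]
    · have hstep : pvStepField (false, d) (p l) l = (false, d) := by
        simp [pvStepField, h]
      rw [hstep, ih]
      simp [h]

-- the triple fold is the three independent per-field folds
theorem pvFold_triple (lines : List String) (a b c : Bool × String) :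
    lines.foldl
      (fun (st : (Bool × String) × (Bool × String) × (Bool × String)) line =>
        (pvStepField st.1 (pvMatchName line) line,
         pvStepField st.2.1 (pvMatchSector line) line,
         pvStepField st.2.2 (pvMatchStage line) line)) (a, b, c) =
      (lines.foldl (fun st line => pvStepField st (pvMatchName line) line) a,
       lines.foldl (fun st line => pvStepField st (pvMatchSector line) line) b,
       lines.foldl (fun st line => pvStepField st (pvMatchStage line) line) c) := by
  induction lines generalizing a b c with
  | nil => rfl
  | cons l ls ih => simp [List.foldl, ih]

-- items/contains facts about A's initial dict literal
theorem pvD0_items : (PySem.Dict.ofList [("name", "the company"), ("sector", "technology"), ("stage", "early stage")] : PySem.Dict String String).items = [("name", "the company"), ("sector", "technology"), ("stage", "early stage")] := by decide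
theorem pvD0_name : (PySem.Dict.ofList [("name", "the company"), ("sector", "technology"), ("stage", "early stage")] : PySem.Dict String String).contains "name" = true := by decide
theorem pvD0_sector : (PySem.Dict.ofList [("name", "the company"), ("sector", "technology"), ("stage", "early stage")] : PySem.Dict String String).contains "sector" = true := by decide
theorem pvD0_stage : (PySem.Dict.ofList [("name", "the company"), ("sector", "technology"), ("stage", "early stage")] : PySem.Dict String String).contains "stage" = true := by decide

-- ===== VERDICT (by name: the statement is the Claim_ definition above) =====
theorem extract_company_details_py_spec : Claim_equal_extract_company_details_py := by
  intro prompt _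
  unfold Spec_extract_company_details_py extract_company_details_py extract_company_details_py_alt
  rw [pvFold_triple]
  simp only [pvFold_field]
  rcases hn : ((PySem.Str.split? prompt "\n").getD []).filter pvMatchName with _ | ⟨mn, _⟩ <;>
  rcases hs : ((PySem.Str.split? prompt "\n").getD []).filter pvMatchSector with _ | ⟨ms, _⟩ <;>
  rcases hg : ((PySem.Str.split? prompt "\n").getD []).filter pvMatchStage with _ | ⟨mg, _⟩ <;>
    simp only [pvExtract] <;>
    (try split_ifs) <;>
    simp [PySem.Dict.items_insert, PySem.Dict.contains_insert, pvD0_items, pvD0_name,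
      pvD0_sector, pvD0_stage]
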